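-- pv_equiv track=rewrite | github.com/Prafulla-Bharate/backend | apps/learning/views.py | _meaningful_token_set
-- ===== SOURCE A (Python) =====
-- def _normalize_token_set(values):
--     tokens = set()
--     for value in values or []:
--         if not value:
--             continue
--         text = str(value).strip().lower()
--         if not text:
--             continue
--         tokens.add(text)
--         for part in text.replace("/", " ").replace("-", " ").split():
--             part = part.strip().lower()
--             if len(part) > 2:
--                 tokens.add(part)
--     return tokens
--
-- def _meaningful_token_set(values):
--     generic_tokens = {
--         "and", "for", "with", "from", "into", "using", "use", "based",
--         "data", "model", "models", "system", "systems", "solution", "solutions",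
--         "engineer", "engineering", "developer", "development", "analyst",
--         "intro", "introduction", "basics", "fundamentals", "advanced", "beginner",
--         "intermediate", "project", "projects", "career", "phase", "learning",
--     }
--     tokens = set()
--     for token in _normalize_token_set(values):
--         if len(token) <= 2:
--             continue
--         if token in generic_tokens:
--             continue
--         tokens.add(token)
--     return tokens
-- ===== SOURCE B (Python) =====
-- def _meaningful_token_set(values):
--     generic_tokens = {
--         "and", "for", "with", "from", "into", "using", "use", "based",
--         "data", "model", "models", "system", "systems", "solution", "solutions",
--         "engineer", "engineering", "developer", "development", "analyst",
--         "intro", "introduction", "basics", "fundamentals", "advanced", "beginner",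
--         "intermediate", "project", "projects", "career", "phase", "learning",
--     }
--     result = set()
--
--     def keep(token):
--         if len(token) > 2 and token not in generic_tokens:
--             result.add(token)
--
--     for value in values or []:
--         if not value:
--             continue
--         text = str(value).strip().lower()
--         if not text:
--             continue
--         keep(text)
--         run = ""
--         for ch in text:
--             if ch.isspace() or ch == "/" or ch == "-":
--                 keep(run)
--                 run = ""
--             else:
--                 run += ch
--         keep(run)
--     return result
-- ===== Notes on version B (the rewrite author's own statement) =====
-- stated objective: alternative
-- what changed: B replaces A's normalize-then-refilter pipeline (build a full token set via two string replace passes plus split, then a second pass filtering it) by a single-pass character-level scanner: one loop over each text's characters splits runs at whitespace//- delimiters and each token is filtered and added to the result set the moment it is complete, so no replaced string, no intermediate set and no second pass exist.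
import Mathlib
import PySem

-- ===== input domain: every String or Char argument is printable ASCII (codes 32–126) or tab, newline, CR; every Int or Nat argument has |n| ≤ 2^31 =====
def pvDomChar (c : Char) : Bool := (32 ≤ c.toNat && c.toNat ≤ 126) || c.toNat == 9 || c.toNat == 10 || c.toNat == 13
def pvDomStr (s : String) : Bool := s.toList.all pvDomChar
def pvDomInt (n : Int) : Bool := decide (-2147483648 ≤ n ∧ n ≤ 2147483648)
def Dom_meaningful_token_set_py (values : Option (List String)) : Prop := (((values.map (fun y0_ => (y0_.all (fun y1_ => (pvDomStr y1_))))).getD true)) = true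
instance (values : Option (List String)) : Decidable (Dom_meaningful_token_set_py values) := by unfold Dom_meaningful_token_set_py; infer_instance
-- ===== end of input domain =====

-- B replaces A's normalize-then-refilter pipeline (two replace passes + split, intermediate
-- set, second filtering pass) by a single character-level scanner that filters and inserts
-- each token as soon as it is complete (objective: alternative). Equivalence is on the return value.

-- ===== PORT A =====

-- the generic_tokens set literal (shared verbatim by both Pythons)
def pvGenericTokens : PySem.Set String := PySem.Set.ofList
  ["and", "for", "with", "from", "into", "using", "use", "based",
   "data", "model", "models", "system", "systems", "solution", "solutions",
   "engineer", "engineering", "developer", "development", "analyst",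
   "intro", "introduction", "basics", "fundamentals", "advanced", "beginner",
   "intermediate", "project", "projects", "career", "phase", "learning"]

-- port of helper _normalize_token_set (the local variables text/part are written inline)
def pvNormalizeTokenSet (values : Option (List String)) : PySem.Set String :=
  (values.getD []).foldl (fun tokens value =>
    if value = "" then tokens
    else if PySem.Str.lower (PySem.Str.strip value) = "" then tokens
    else
      (PySem.Str.split₀ (PySem.Str.replace (PySem.Str.replace
          (PySem.Str.lower (PySem.Str.strip value)) "/" " ") "-" " ")).foldl
        (fun tokens part =>
          if 2 < PySem.Str.len (PySem.Str.lower (PySem.Str.strip part)) then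
            PySem.Set.add tokens (PySem.Str.lower (PySem.Str.strip part))
          else tokens)
        (PySem.Set.add tokens (PySem.Str.lower (PySem.Str.strip value)))) []

def meaningful_token_set_py (values : Option (List String)) : List String :=
  (pvNormalizeTokenSet values).foldl (fun tokens token =>
    if PySem.Str.len token ≤ 2 then tokens
    else if PySem.Set.contains pvGenericTokens token then tokens
    else PySem.Set.add tokens token) []

-- ===== PORT B =====

-- port of B's local 'keep' closure
def pvKeep (res : PySem.Set String) (token : String) : PySem.Set String :=
  if 2 < PySem.Str.len token ∧ ¬ (PySem.Set.contains pvGenericTokens token = true) then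
    PySem.Set.add res token
  else res

-- B's Python accumulates the current run by string concatenation; the port carries the run
-- as the exact List Char of that string (String.ofList at each flush), which is exact.
def meaningful_token_set_py_alt (values : Option (List String)) : List String :=
  (values.getD []).foldl (fun res value =>
    if value = "" then res
    else if PySem.Str.lower (PySem.Str.strip value) = "" then res
    else
      pvKeep
        ((PySem.Str.lower (PySem.Str.strip value)).toList.foldl
          (fun (p : PySem.Set String × List Char) ch =>
            if PySem.Chars.isspace ch || ch == '/' || ch == '-' then
              (pvKeep p.1 (String.ofList p.2), [])
            else (p.1, p.2 ++ [ch]))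
          (pvKeep res (PySem.Str.lower (PySem.Str.strip value)), [])).1
        (String.ofList ((PySem.Str.lower (PySem.Str.strip value)).toList.foldl
          (fun (p : PySem.Set String × List Char) ch =>
            if PySem.Chars.isspace ch || ch == '/' || ch == '-' then
              (pvKeep p.1 (String.ofList p.2), [])
            else (p.1, p.2 ++ [ch]))
          (pvKeep res (PySem.Str.lower (PySem.Str.strip value)), [])).2)) []

-- ===== PRECONDITION & SPEC =====
def Spec_meaningful_token_set_py (values : Option (List String)) (out : List String) : Prop := out = meaningful_token_set_py_alt values
instance (values : Option (List String)) (out : List String) : Decidable (Spec_meaningful_token_set_py values out) := by unfold Spec_meaningful_token_set_py; infer_instance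

-- ===== CLAIM (what is proved, stated in full; the proofs are below) =====
def Claim_equal_meaningful_token_set_py : Prop := ∀ (values : Option (List String)), Dom_meaningful_token_set_py values → Spec_meaningful_token_set_py values (meaningful_token_set_py values)

-- ===== LEMMAS AND PROOFS =====

-- the final filtering predicate (common to both reductions)
def pvCond (t : String) : Bool :=
  decide (2 < PySem.Str.len t) && !(PySem.Set.contains pvGenericTokens t)

-- delimiter class of B's scanner
def pvD (c : Char) : Bool := PySem.Chars.isspace c || c == '/' || c == '-'

-- combined effect of A's two single-character replaces
def pvSubst (c : Char) : Char := if c = '/' then ' ' else if c = '-' then ' ' else c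

-- the run list B's scanner flushes, including empty runs
def pvTokensL : List Char → List Char → List (List Char)
  | [], run => [run]
  | c :: t, run => if pvD c then run :: pvTokensL t [] else pvTokensL t (run ++ [c])

-- split₀.go re-expressed over the original characters with delimiter class pvD
def pvSplitDgo : List Char → List Char → List (List Char) → List (List Char)
  | [], cur, acc => if cur.isEmpty then acc.reverse else (cur.reverse :: acc).reverse
  | c :: t, cur, acc =>
      if pvD c then (if cur.isEmpty then pvSplitDgo t [] acc else pvSplitDgo t [] (cur.reverse :: acc))
      else pvSplitDgo t (c :: cur) acc

-- the word pieces of a text, each after A's per-part strip().lower()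
def pvParts (text : String) : List String :=
  (PySem.Str.split₀ (PySem.Str.replace (PySem.Str.replace text "/" " ") "-" " ")).map
    (fun p => PySem.Str.lower (PySem.Str.strip p))

-- the sequence of set-insertions A's helper performs for one value
def pvEvA (value : String) : List String :=
  if value = "" then []
  else if PySem.Str.lower (PySem.Str.strip value) = "" then []
  else PySem.Str.lower (PySem.Str.strip value) ::
    (pvParts (PySem.Str.lower (PySem.Str.strip value))).filter
      (fun q => decide (2 < PySem.Str.len q))

-- the candidates B's scanner offers to keep for one value
def pvEvB (value : String) : List String :=
  if value = "" then []
  else if PySem.Str.lower (PySem.Str.strip value) = "" then []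
  else PySem.Str.lower (PySem.Str.strip value) ::
    (pvTokensL (PySem.Str.lower (PySem.Str.strip value)).toList []).map String.ofList

-- A's inner part-loop = plain set-insertion of the (>2)-filtered stripped/lowered parts
theorem innerA_eq (ps : List String) (s : PySem.Set String) :
    ps.foldl (fun tokens part =>
        if 2 < PySem.Str.len (PySem.Str.lower (PySem.Str.strip part)) then
          PySem.Set.add tokens (PySem.Str.lower (PySem.Str.strip part))
        else tokens) s
      = ((ps.map (fun p => PySem.Str.lower (PySem.Str.strip p))).filter
          (fun q => decide (2 < PySem.Str.len q))).foldl PySem.Set.add s := by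
  induction ps generalizing s with
  | nil => simp only [List.foldl_nil, List.map_nil, List.filter_nil]
  | cons p ps ih =>
    simp only [List.foldl_cons, List.map_cons, List.filter_cons]
    by_cases h : 2 < PySem.Str.len (PySem.Str.lower (PySem.Str.strip p))
    · rw [if_pos h, ih, decide_eq_true h, if_pos rfl, List.foldl_cons]
    · rw [if_neg h, ih, decide_eq_false h, if_neg (by exact Bool.false_ne_true)]

-- A's helper performs exactly the insertions pvEvA, value by value
theorem outerA_eq (vs : List String) (s : PySem.Set String) :
    vs.foldl (fun tokens value =>
        if value = "" then tokens
        else if PySem.Str.lower (PySem.Str.strip value) = "" then tokens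
        else
          (PySem.Str.split₀ (PySem.Str.replace (PySem.Str.replace
              (PySem.Str.lower (PySem.Str.strip value)) "/" " ") "-" " ")).foldl
            (fun tokens part =>
              if 2 < PySem.Str.len (PySem.Str.lower (PySem.Str.strip part)) then
                PySem.Set.add tokens (PySem.Str.lower (PySem.Str.strip part))
              else tokens)
            (PySem.Set.add tokens (PySem.Str.lower (PySem.Str.strip value)))) s
      = (vs.flatMap pvEvA).foldl PySem.Set.add s := by
  induction vs generalizing s with
  | nil => simp only [List.foldl_nil, List.flatMap_nil]
  | cons v vs ih =>
    simp only [List.foldl_cons, List.flatMap_cons, List.foldl_append]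
    rw [ih]
    congr 1
    unfold pvEvA pvParts
    by_cases h0 : v = ""
    · rw [if_pos h0, if_pos h0, List.foldl_nil]
    · rw [if_neg h0, if_neg h0]
      by_cases h1 : PySem.Str.lower (PySem.Str.strip v) = ""
      · rw [if_pos h1, if_pos h1, List.foldl_nil]
      · rw [if_neg h1, if_neg h1, innerA_eq, List.foldl_cons]

-- A's second pass = plain set-insertion of the pvCond-filtered tokens
theorem mainA_eq (l : List String) (s : PySem.Set String) :
    l.foldl (fun tokens token =>
        if PySem.Str.len token ≤ 2 then tokens
        else if PySem.Set.contains pvGenericTokens token then tokens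
        else PySem.Set.add tokens token) s
      = (l.filter pvCond).foldl PySem.Set.add s := by
  induction l generalizing s with
  | nil => rfl
  | cons t l ih =>
    simp only [List.foldl_cons, List.filter_cons]
    by_cases h1 : PySem.Str.len t ≤ 2
    · have hc : pvCond t = false := by
        unfold pvCond
        rw [decide_eq_false (by omega : ¬ 2 < PySem.Str.len t), Bool.false_and]
      rw [if_pos h1, ih, hc, if_neg (by exact Bool.false_ne_true)]
    · rw [if_neg h1]
      by_cases h2 : PySem.Set.contains pvGenericTokens t = true
      · have hc : pvCond t = false := by
          unfold pvCond
          rw [h2, Bool.not_true, Bool.and_false]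
        rw [if_pos h2, ih, hc, if_neg (by exact Bool.false_ne_true)]
      · have hc : pvCond t = true := by
          unfold pvCond
          rw [decide_eq_true (by omega : 2 < PySem.Str.len t),
            Bool.eq_false_iff.mpr h2, Bool.not_false, Bool.and_true]
        rw [if_neg h2, ih, hc, if_pos rfl, List.foldl_cons]

-- filter commutes with set-building (first-occurrence dedup)
theorem filter_foldl_add {α : Type} [BEq α] [LawfulBEq α] (p : α → Bool) (l : List α)
    (s : PySem.Set α) :
    (l.foldl PySem.Set.add s).filter p = (l.filter p).foldl PySem.Set.add (s.filter p) := by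
  induction l generalizing s with
  | nil => simp only [List.foldl_nil, List.filter_nil]
  | cons x l ih =>
    simp only [List.foldl_cons, List.filter_cons]
    rw [ih]
    have hadd : (PySem.Set.add s x).filter p
        = if p x = true then PySem.Set.add (s.filter p) x else s.filter p := by
      unfold PySem.Set.add
      have hcont : PySem.Set.contains (s.filter p) x = true ↔ (PySem.Set.contains s x = true ∧ p x = true) := by
        rw [PySem.Set.contains_iff, PySem.Set.contains_iff, List.mem_filter]
      by_cases hpx : p x = true
      · rw [if_pos hpx]
        by_cases hm : PySem.Set.contains s x = true
        · rw [if_pos hm, if_pos (hcont.mpr ⟨hm, hpx⟩)]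
        · rw [if_neg hm, if_neg (fun h => hm (hcont.mp h).1), List.filter_append]
          simp [hpx]
      · rw [if_neg hpx]
        by_cases hm : PySem.Set.contains s x = true
        · rw [if_pos hm]
        · rw [if_neg hm, List.filter_append]
          simp [Bool.eq_false_iff.mpr hpx]
    by_cases hpx : p x = true
    · rw [hadd, if_pos hpx, if_pos hpx, List.foldl_cons]
    · rw [hadd, if_neg hpx, if_neg hpx]

-- pvKeep = conditional insertion under pvCond
theorem keep_eq (res : PySem.Set String) (t : String) :
    pvKeep res t = if pvCond t = true then PySem.Set.add res t else res := by
  unfold pvKeep pvCond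
  by_cases h1 : 2 < PySem.Str.len t
  · by_cases h2 : PySem.Set.contains pvGenericTokens t = true
    · simp [h1, h2]
    · simp [h1, h2]
  · simp [h1]

-- folding pvKeep = plain set-insertion of the pvCond-filtered tokens
theorem keep_foldl (l : List String) (res : PySem.Set String) :
    l.foldl pvKeep res = (l.filter pvCond).foldl PySem.Set.add res := by
  induction l generalizing res with
  | nil => rfl
  | cons t l ih =>
    simp only [List.foldl_cons, List.filter_cons, keep_eq]
    by_cases h : pvCond t = true
    · rw [if_pos h, if_pos h, ih, List.foldl_cons]
    · rw [if_neg h, if_neg (fun hh => h hh), ih]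

-- B's character scan flushes exactly the runs pvTokensL
theorem innerB_eq (l : List Char) (res : PySem.Set String) (run : List Char) :
    pvKeep
      (l.foldl (fun (p : PySem.Set String × List Char) ch =>
        if PySem.Chars.isspace ch || ch == '/' || ch == '-' then
          (pvKeep p.1 (String.ofList p.2), [])
        else (p.1, p.2 ++ [ch])) (res, run)).1
      (String.ofList (l.foldl (fun (p : PySem.Set String × List Char) ch =>
        if PySem.Chars.isspace ch || ch == '/' || ch == '-' then
          (pvKeep p.1 (String.ofList p.2), [])
        else (p.1, p.2 ++ [ch])) (res, run)).2)
      = ((pvTokensL l run).map String.ofList).foldl pvKeep res := by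
  induction l generalizing res run with
  | nil => simp only [List.foldl_nil, pvTokensL, List.map_cons, List.map_nil,
      List.foldl_cons, List.foldl_nil]
  | cons c t ih =>
    simp only [List.foldl_cons, pvTokensL]
    rw [show (PySem.Chars.isspace c || c == '/' || c == '-') = pvD c from rfl]
    by_cases h : pvD c = true
    · rw [if_pos h, if_pos h, List.map_cons, List.foldl_cons, ih]
    · rw [if_neg h, if_neg h, ih]

-- B's value loop performs exactly the insertions pvEvB, value by value
theorem outerB_eq (vs : List String) (res : PySem.Set String) :
    vs.foldl (fun res value =>
      if value = "" then res
      else if PySem.Str.lower (PySem.Str.strip value) = "" then res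
      else
        pvKeep
          ((PySem.Str.lower (PySem.Str.strip value)).toList.foldl
            (fun (p : PySem.Set String × List Char) ch =>
              if PySem.Chars.isspace ch || ch == '/' || ch == '-' then
                (pvKeep p.1 (String.ofList p.2), [])
              else (p.1, p.2 ++ [ch]))
            (pvKeep res (PySem.Str.lower (PySem.Str.strip value)), [])).1
          (String.ofList ((PySem.Str.lower (PySem.Str.strip value)).toList.foldl
            (fun (p : PySem.Set String × List Char) ch =>
              if PySem.Chars.isspace ch || ch == '/' || ch == '-' then
                (pvKeep p.1 (String.ofList p.2), [])
              else (p.1, p.2 ++ [ch]))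
            (pvKeep res (PySem.Str.lower (PySem.Str.strip value)), [])).2)) res
      = (vs.flatMap pvEvB).foldl pvKeep res := by
  induction vs generalizing res with
  | nil => simp only [List.foldl_nil, List.flatMap_nil]
  | cons v vs ih =>
    simp only [List.foldl_cons, List.flatMap_cons, List.foldl_append]
    rw [ih]
    congr 1
    unfold pvEvB
    by_cases h0 : v = ""
    · rw [if_pos h0, if_pos h0, List.foldl_nil]
    · rw [if_neg h0, if_neg h0]
      by_cases h1 : PySem.Str.lower (PySem.Str.strip v) = ""
      · rw [if_pos h1, if_pos h1, List.foldl_nil]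
      · rw [if_neg h1, if_neg h1, innerB_eq, List.foldl_cons]

-- A's double replace = one character substitution
theorem replace_go_single (c d : Char) :
    ∀ (fuel : Nat) (l : List Char) (acc : List Char), l.length ≤ fuel →
      PySem.Chars.replace.go [c] [d] fuel l acc
        = acc.reverse ++ l.map (fun x => if x = c then d else x) := by
  intro fuel
  induction fuel with
  | zero =>
    intro l acc h
    have : l = [] := List.eq_nil_of_length_eq_zero (Nat.le_zero.mp h)
    subst this; rfl
  | succ n ih =>
    intro l acc h
    cases l with
    | nil => simp [PySem.Chars.replace.go]
    | cons x t =>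
      show PySem.Chars.replace.go [c] [d] (n+1) (x :: t) acc = _
      rw [PySem.Chars.replace.go]
      by_cases hx : x = c
      · have hp : List.isPrefixOf [c] (x :: t) = true := by
          subst hx; simp [List.isPrefixOf]
        rw [if_pos hp]
        have : List.drop [c].length (x :: t) = t := rfl
        rw [this, ih t _ (Nat.le_of_succ_le_succ h)]
        simp [hx]
      · have hp : ¬ List.isPrefixOf [c] (x :: t) = true := by
          simp only [List.isPrefixOf, List.isPrefixOf_nil_left, Bool.and_true, beq_iff_eq]
          exact fun hh => hx hh.symm
        rw [if_neg hp, ih t _ (Nat.le_of_succ_le_succ h)]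
        simp [hx]

theorem replace_single (c d : Char) (l : List Char) :
    PySem.Chars.replace l [c] [d] = l.map (fun x => if x = c then d else x) := by
  unfold PySem.Chars.replace
  rw [if_neg (by simp), replace_go_single c d l.length l [] (Nat.le_refl _)]
  rfl

theorem double_replace (l : List Char) :
    PySem.Chars.replace (PySem.Chars.replace l ['/'] [' ']) ['-'] [' '] = l.map pvSubst := by
  rw [replace_single, replace_single, List.map_map]
  refine List.map_congr_left (fun x _ => ?_)
  unfold pvSubst
  by_cases h1 : x = '/'
  · simp [h1]
  · by_cases h2 : x = '-'
    · simp [h1, h2]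
    · simp [h1, h2]

-- whitespace after substitution = the delimiter class
theorem isspace_subst (c : Char) : PySem.Chars.isspace (pvSubst c) = pvD c := by
  unfold pvSubst pvD
  by_cases h1 : c = '/'
  · subst h1; decide
  · by_cases h2 : c = '-'
    · subst h2; decide
    · rw [if_neg h1, if_neg h2,
        show (c == '/') = false from beq_eq_false_iff_ne.mpr h1,
        show (c == '-') = false from beq_eq_false_iff_ne.mpr h2,
        Bool.or_false, Bool.or_false]

-- a non-delimiter is untouched by the substitution
theorem subst_of_not_delim (c : Char) (h : pvD c = false) : pvSubst c = c := by
  unfold pvD at h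
  unfold pvSubst
  rw [if_neg, if_neg]
  · intro hc; subst hc; simp at h
  · intro hc; subst hc; simp at h

-- split₀.go over the substituted characters = pvSplitDgo over the originals
theorem split_go_eq (l : List Char) : ∀ (cur : List Char) (acc : List (List Char)),
    PySem.Chars.split₀.go (l.map pvSubst) cur acc = pvSplitDgo l cur acc := by
  induction l with
  | nil => intro cur acc; rfl
  | cons c t ih =>
    intro cur acc
    show PySem.Chars.split₀.go (pvSubst c :: t.map pvSubst) cur acc = _
    rw [PySem.Chars.split₀.go, pvSplitDgo, isspace_subst]
    by_cases h : pvD c = true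
    · rw [if_pos h, if_pos h]
      by_cases hc : cur.isEmpty
      · rw [if_pos hc, if_pos hc, ih]
      · rw [if_neg hc, if_neg hc, ih]
    · rw [if_neg h, if_neg h, subst_of_not_delim c (Bool.eq_false_iff.mpr h), ih]

-- pvSplitDgo = the nonempty runs of pvTokensL
theorem splitD_tokens (l : List Char) : ∀ (cur : List Char) (acc : List (List Char)),
    pvSplitDgo l cur acc
      = acc.reverse ++ (pvTokensL l cur.reverse).filter (fun r => !r.isEmpty) := by
  induction l with
  | nil =>
    intro cur acc
    show (if cur.isEmpty then acc.reverse else (cur.reverse :: acc).reverse) = _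
    by_cases hc : cur.isEmpty = true
    · have hcur : cur = [] := by cases cur <;> simp_all
      subst hcur
      simp [pvTokensL]
    · have hcur : cur ≠ [] := by cases cur <;> simp_all
      simp [hc, pvTokensL, hcur]
  | cons c t ih =>
    intro cur acc
    show (if pvD c then (if cur.isEmpty then pvSplitDgo t [] acc
            else pvSplitDgo t [] (cur.reverse :: acc))
          else pvSplitDgo t (c :: cur) acc) = _
    rw [pvTokensL]
    by_cases h : pvD c = true
    · rw [if_pos h, if_pos h, List.filter_cons]
      by_cases hc : cur.isEmpty = true
      · have hcur : cur = [] := by cases cur <;> simp_all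
        subst hcur
        simp [ih]
      · have hcur : cur ≠ [] := by cases cur <;> simp_all
        simp [hc, ih, hcur]
    · rw [if_neg h, if_neg h, ih]
      simp

-- every character of every flushed run is a non-delimiter from the text (or from the seed run)
theorem tokens_chars (l : List Char) : ∀ (run r : List Char),
    r ∈ pvTokensL l run → ∀ c ∈ r, c ∈ run ∨ (c ∈ l ∧ pvD c = false) := by
  induction l with
  | nil =>
    intro run r hr c hc
    simp only [pvTokensL, List.mem_singleton] at hr
    subst hr
    exact Or.inl hc
  | cons d t ih =>
    intro run r hr c hc
    rw [pvTokensL] at hr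
    by_cases h : pvD d = true
    · rw [if_pos h] at hr
      rcases List.mem_cons.mp hr with h1 | h1
      · subst h1; exact Or.inl hc
      · rcases ih [] r h1 c hc with h2 | h2
        · cases h2
        · exact Or.inr ⟨List.mem_cons_of_mem d h2.1, h2.2⟩
    · rw [if_neg h] at hr
      rcases ih (run ++ [d]) r hr c hc with h2 | h2
      · rcases List.mem_append.mp h2 with h3 | h3
        · exact Or.inl h3
        · rw [List.mem_singleton] at h3
          subst h3
          exact Or.inr ⟨List.mem_cons_self, Bool.eq_false_iff.mpr h⟩
      · exact Or.inr ⟨List.mem_cons_of_mem d h2.1, h2.2⟩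

-- charwise lemmas: isupper/lowerChar arithmetic
theorem isupper_iff (c : Char) : PySem.Chars.isupper c = true ↔ (65 ≤ c.toNat ∧ c.toNat ≤ 90) := by
  have h1 : ('A' ≤ c) ↔ 65 ≤ c.toNat := by
    rw [Char.le_def, UInt32.le_iff_toNat_le]
    exact Iff.rfl
  have h2 : (c ≤ 'Z') ↔ c.toNat ≤ 90 := by
    rw [Char.le_def, UInt32.le_iff_toNat_le]
    exact Iff.rfl
  simp [PySem.Chars.isupper, h1, h2]

theorem isupper_lowerChar (c : Char) : PySem.Chars.isupper (PySem.Chars.lowerChar c) = false := by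
  unfold PySem.Chars.lowerChar
  by_cases hu : PySem.Chars.isupper c = true
  · rw [if_pos hu]
    have hc := (isupper_iff c).mp hu
    have hv : (c.toNat + 32).isValidChar := by left; omega
    have ht : (Char.ofNat (c.toNat + 32)).toNat = c.toNat + 32 := by
      rw [Char.toNat_ofNat, if_pos hv]
    rw [Bool.eq_false_iff]
    intro h
    have := (isupper_iff _).mp h
    omega
  · rw [if_neg hu]
    exact Bool.eq_false_iff.mpr hu

theorem lowerChar_idem (c : Char) : PySem.Chars.lowerChar (PySem.Chars.lowerChar c) = PySem.Chars.lowerChar c := by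
  rw [PySem.Chars.lowerChar, isupper_lowerChar]
  simp

-- strip is the identity on a run without whitespace
theorem strip_no_space (r : List Char) (h : ∀ c ∈ r, PySem.Chars.isspace c = false) :
    PySem.Chars.strip r = r := by
  unfold PySem.Chars.strip PySem.Chars.lstrip PySem.Chars.rstrip
  rw [List.dropWhile_eq_self_iff.mpr, List.dropWhile_eq_self_iff.mpr, List.reverse_reverse]
  · intro hl hp
    have := h _ (List.getElem_mem hl)
    rw [this] at hp
    cases hp
  · intro hl hp
    have hmem := (List.dropWhile_sublist (l := r) (p := PySem.Chars.isspace)).subset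
      (List.mem_reverse.mp (List.getElem_mem hl))
    have := h _ hmem
    rw [this] at hp
    cases hp

-- lower is the identity on a run of lowerChar-fixed characters
theorem lower_fixed (r : List Char) (h : ∀ c ∈ r, PySem.Chars.lowerChar c = c) :
    PySem.Chars.lower r = r := by
  unfold PySem.Chars.lower
  rw [List.map_congr_left h]
  simp

-- A per-part strip().lower() is the identity on every run the scanner flushes
theorem part_fixed (text : String)
    (hlow : ∀ c ∈ text.toList, PySem.Chars.lowerChar c = c)
    (r : List Char) (hr : r ∈ pvTokensL text.toList []) :
    PySem.Str.lower (PySem.Str.strip (String.ofList r)) = String.ofList r := by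
  have hchars : ∀ c ∈ r, c ∈ text.toList ∧ pvD c = false := by
    intro c hc
    rcases tokens_chars text.toList [] r hr c hc with h | h
    · cases h
    · exact h
  have htl : (PySem.Str.lower (PySem.Str.strip (String.ofList r))).toList = r := by
    rw [PySem.Str.toList_lower, PySem.Str.toList_strip, String.toList_ofList,
      strip_no_space, lower_fixed]
    · intro c hc
      exact hlow c (hchars c hc).1
    · intro c hc
      have := (hchars c hc).2
      unfold pvD at this
      rcases Bool.or_eq_false_iff.mp (Bool.or_eq_false_iff.mp this).1 with ⟨h1, _⟩
      exact h1
  rw [← String.ofList_toList (s := PySem.Str.lower (PySem.Str.strip (String.ofList r))), htl]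

-- A pipeline: replace / replace / split / per-part strip+lower = the nonempty scanner runs
theorem parts_eq (text : String)
    (hlow : ∀ c ∈ text.toList, PySem.Chars.lowerChar c = c) :
    pvParts text
      = ((pvTokensL text.toList []).filter (fun r => !r.isEmpty)).map String.ofList := by
  have hX : (PySem.Str.replace (PySem.Str.replace text "/" " ") "-" " ").toList
      = text.toList.map pvSubst := by
    rw [PySem.Str.toList_replace, PySem.Str.toList_replace]
    rw [show ("/" : String).toList = ['/'] from rfl, show ("-" : String).toList = ['-'] from rfl,
      show (" " : String).toList = [' '] from rfl]
    exact double_replace text.toList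
  unfold pvParts PySem.Str.split₀ PySem.Chars.split₀
  rw [hX, split_go_eq, splitD_tokens]
  simp only [List.reverse_nil, List.nil_append, List.map_map]
  refine List.map_congr_left (fun r hrm => ?_)
  exact part_fixed text hlow r (List.mem_filter.mp hrm).1

-- pvCond subsumes the (> 2)-length prefilter
theorem filter_cond_len (xs : List String) :
    (xs.filter (fun q => decide (2 < PySem.Str.len q))).filter pvCond = xs.filter pvCond := by
  rw [List.filter_comm, List.filter_filter]
  refine List.filter_congr (fun a _ => ?_)
  by_cases h : 2 < PySem.Str.len a <;> simp [pvCond, h]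

-- pvCond rejects the empty string, so the scanner's empty runs are invisible to it
theorem filter_cond_empty (T : List (List Char)) :
    ((T.filter (fun r => !r.isEmpty)).map String.ofList).filter pvCond
      = (T.map String.ofList).filter pvCond := by
  rw [List.filter_map, List.filter_map, List.filter_filter]
  refine congrArg _ (List.filter_congr (fun r _ => ?_))
  cases r with
  | nil => simp [pvCond, PySem.Str.len]
  | cons c t => simp

-- per value, A's insertions filtered by pvCond = B's candidates filtered by pvCond
theorem evAB (v : String) : (pvEvA v).filter pvCond = (pvEvB v).filter pvCond := by
  unfold pvEvA pvEvB
  by_cases h0 : v = ""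
  · rw [if_pos h0, if_pos h0]
  · rw [if_neg h0, if_neg h0]
    by_cases h1 : PySem.Str.lower (PySem.Str.strip v) = ""
    · rw [if_pos h1, if_pos h1]
    · rw [if_neg h1, if_neg h1]
      simp only [List.filter_cons]
      have hlow : ∀ c ∈ (PySem.Str.lower (PySem.Str.strip v)).toList,
          PySem.Chars.lowerChar c = c := by
        intro c hc
        rw [PySem.Str.toList_lower] at hc
        rcases List.mem_map.mp hc with ⟨x, _, hx⟩
        rw [← hx]
        exact lowerChar_idem x
      rw [filter_cond_len, parts_eq _ hlow, filter_cond_empty]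

-- ===== VERDICT (by name: the statement is the Claim_ definition above) =====
theorem meaningful_token_set_py_spec : Claim_equal_meaningful_token_set_py := by
  intro values _
  show meaningful_token_set_py values = meaningful_token_set_py_alt values
  unfold meaningful_token_set_py meaningful_token_set_py_alt pvNormalizeTokenSet
  rw [outerA_eq, mainA_eq, outerB_eq, keep_foldl]
  have hA : (((values.getD []).flatMap pvEvA).foldl PySem.Set.add ([] : PySem.Set String)).filter pvCond
      = (((values.getD []).flatMap pvEvA).filter pvCond).foldl PySem.Set.add [] := by
    rw [filter_foldl_add]
    rfl
  rw [hA, ← PySem.Set.ofList_eq_foldl, ← PySem.Set.ofList_eq_foldl,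
    PySem.Set.ofList_ofList]
  exact congrArg PySem.Set.ofList (by
    rw [List.filter_flatMap, List.filter_flatMap]
    exact List.flatMap_congr (fun v _ => evAB v))
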